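-- pv_equiv track=rewrite | github.com/skylinkapi/SkyLink-API-V3 | charts_aerodrome/sources/colombia_scraper.py | _categorize_chart
-- ===== SOURCE A (Python) =====
-- def _categorize_chart(filename: str) -> str:
--     """Categorize chart based on filename prefix."""
--     filename_lower = filename.lower()
--
--     # Check for explicit type prefixes in filename
--     if filename_lower.startswith('sid '):
--         return 'sid'
--
--     if filename_lower.startswith('star '):
--         return 'star'
--
--     if filename_lower.startswith('iac '):
--         return 'approach'
--
--     if filename_lower.startswith('vac '):
--         return 'approach'
--
--     # Ground movement and airport diagrams
--     if any(keyword in filename_lower for keyword in [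
--         'aerodrome ground mov', 'ground mov',
--         'aerodrome heliport', 'heliport chart',
--         'aircraft parking', 'parking',
--         'aerodrome taxying', 'taxying',
--         'aerodrome chart', 'airport chart'
--     ]):
--         return 'airport_diagram'
--
--     # Obstacle and precision approach terrain charts
--     if any(keyword in filename_lower for keyword in [
--         'aerodrome obstacle', 'obstacle chart',
--         'aerodrome precision', 'precision approach terrain',
--         'aerodrome critical', 'critical area',
--         'aerodrome sensitive', 'sensitive area'
--     ]):
--         return 'airport_diagram'
--
--     # Minimum altitude and vectoring charts (informational)
--     if any(keyword in filename_lower for keyword in [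
--         'minimum area altitude', 'minimum vectoring',
--         'control zone', 'visibility chart',
--         'wpt coordinates'
--     ]):
--         return 'airport_diagram'
--
--     # Default to airport_diagram for unclear cases
--     return 'airport_diagram'
-- ===== SOURCE B (Python) =====
-- _TOKEN_CATEGORY = {'sid': 'sid', 'star': 'star', 'iac': 'approach', 'vac': 'approach'}
--
--
-- def _categorize_chart(filename: str) -> str:
--     """Categorize a chart by its first space-delimited word, looked up in a token table."""
--     head, sep, _ = filename.lower().partition(' ')
--     if sep:
--         return _TOKEN_CATEGORY.get(head, 'airport_diagram')
--     return 'airport_diagram'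
-- ===== Notes on version B (the rewrite author's own statement) =====
-- stated objective: simpler
-- what changed: Instead of A's ordered chain of four startswith tests followed by three any()-over-keyword substring scans (which, like the default, all return 'airport_diagram'), B partitions the lowercased filename at its first space and looks the first word up in a token->category dict, defaulting to 'airport_diagram'.
import Mathlib
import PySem

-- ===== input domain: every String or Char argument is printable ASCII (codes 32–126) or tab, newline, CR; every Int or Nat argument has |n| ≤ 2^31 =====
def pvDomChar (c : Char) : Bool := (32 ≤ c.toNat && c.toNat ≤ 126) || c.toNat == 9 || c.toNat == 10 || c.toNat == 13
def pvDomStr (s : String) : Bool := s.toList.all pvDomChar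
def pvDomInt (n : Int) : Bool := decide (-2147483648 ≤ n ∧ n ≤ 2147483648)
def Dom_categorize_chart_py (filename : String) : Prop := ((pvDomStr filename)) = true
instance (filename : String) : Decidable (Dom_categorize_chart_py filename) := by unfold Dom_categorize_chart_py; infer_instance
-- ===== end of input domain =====

-- B categorizes by the first space-delimited word (partition + one table lookup) instead of
-- A's ordered prefix-test chain and its three any()-over-keyword substring scans.
-- ===== PORT A =====
def categorize_chart_py (filename : String) : String :=
  let filename_lower := PySem.Str.lower filename
  if PySem.Str.startswith filename_lower "sid " then "sid"
  else if PySem.Str.startswith filename_lower "star " then "star"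
  else if PySem.Str.startswith filename_lower "iac " then "approach"
  else if PySem.Str.startswith filename_lower "vac " then "approach"
  else if (["aerodrome ground mov", "ground mov",
            "aerodrome heliport", "heliport chart",
            "aircraft parking", "parking",
            "aerodrome taxying", "taxying",
            "aerodrome chart", "airport chart"].any
            (fun keyword => PySem.Str.isIn keyword filename_lower)) then "airport_diagram"
  else if (["aerodrome obstacle", "obstacle chart",
            "aerodrome precision", "precision approach terrain",
            "aerodrome critical", "critical area",
            "aerodrome sensitive", "sensitive area"].any
            (fun keyword => PySem.Str.isIn keyword filename_lower)) then "airport_diagram"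
  else if (["minimum area altitude", "minimum vectoring",
            "control zone", "visibility chart",
            "wpt coordinates"].any
            (fun keyword => PySem.Str.isIn keyword filename_lower)) then "airport_diagram"
  else "airport_diagram"

-- ===== PORT B =====
def pvTokenCategory : PySem.Dict String String :=
  PySem.Dict.ofList [("sid", "sid"), ("star", "star"), ("iac", "approach"), ("vac", "approach")]

-- str.partition(' ') is ported by hand (PySem has no partition): for a one-character
-- separator, head = the chars before the first ' ' (takeWhile) and sep is nonempty
-- iff a ' ' occurs, i.e. iff dropWhile leaves something — exact CPython behaviour.
def categorize_chart_py_alt (filename : String) : String :=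
  let fl := (PySem.Str.lower filename).toList
  let head := fl.takeWhile (fun c => c != ' ')
  let sep := fl.dropWhile (fun c => c != ' ')
  if sep ≠ [] then PySem.Dict.getD pvTokenCategory (String.ofList head) "airport_diagram"
  else "airport_diagram"

-- ===== PRECONDITION & SPEC =====
def Spec_categorize_chart_py (filename : String) (out : String) : Prop := out = categorize_chart_py_alt filename
instance (filename : String) (out : String) : Decidable (Spec_categorize_chart_py filename out) := by unfold Spec_categorize_chart_py; infer_instance

-- ===== CLAIM =====
def Claim_equal_categorize_chart_py : Prop := ∀ (filename : String), Dom_categorize_chart_py filename → Spec_categorize_chart_py filename (categorize_chart_py filename)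

-- ===== LEMMAS AND PROOFS =====
-- A's three keyword branches and its final default all return the same value.
theorem ite_tail_default {α : Type} (c1 c2 c3 : Prop) [Decidable c1] [Decidable c2]
    [Decidable c3] (d : α) :
    (if c1 then d else if c2 then d else if c3 then d else d) = d := by
  split_ifs <;> rfl

-- For a space-free token t, "t + ' ' is a prefix of L" is exactly "partition at the first
-- space yields head t with a separator found".
theorem partition_prefix_iff (t : List Char) (ht : ' ' ∉ t) (L : List Char) :
    (t ++ [' ']) <+: L ↔
      (L.takeWhile (fun c => c != ' ') = t ∧ L.dropWhile (fun c => c != ' ') ≠ []) := by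
  induction t generalizing L with
  | nil =>
    cases L with
    | nil => simp
    | cons c cs =>
      by_cases hc : c = ' '
      · simp [hc, List.cons_prefix_cons]
      · simp [hc, List.cons_prefix_cons]
        exact fun h => hc h.symm
  | cons a t' ih =>
    have ha : a ≠ ' ' := fun h => ht (h ▸ List.mem_cons_self)
    have ht' : ' ' ∉ t' := fun h => ht (List.mem_cons_of_mem _ h)
    cases L with
    | nil => simp
    | cons c cs =>
      by_cases hca : c = a
      · subst hca
        simp [ha, List.cons_prefix_cons, ih ht' cs]
      · constructor
        · intro h
          exact absurd ((List.cons_prefix_cons.mp h).1) (fun h' => hca h'.symm)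
        · rintro ⟨h1, _⟩
          by_cases hc : c = ' '
          · simp [hc] at h1
          · simp [hc] at h1
            exact absurd h1.1 hca

-- the literal table lookup, evaluated
theorem pvTokenCategory_getD (k : String) :
    PySem.Dict.getD pvTokenCategory k "airport_diagram" =
      if "sid" = k then "sid" else if "star" = k then "star"
      else if "iac" = k then "approach" else if "vac" = k then "approach"
      else "airport_diagram" := by
  have hmk : pvTokenCategory =
      PySem.Dict.mk [("sid", "sid"), ("star", "star"), ("iac", "approach"), ("vac", "approach")] := by
    decide
  simp only [PySem.Dict.getD, hmk, PySem.Dict.get?_mk_cons, beq_iff_eq]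
  split_ifs <;> rfl

-- ===== VERDICT =====
theorem categorize_chart_py_spec : Claim_equal_categorize_chart_py := by
  intro filename hdom
  unfold Spec_categorize_chart_py categorize_chart_py categorize_chart_py_alt
  simp only [ite_tail_default, pvTokenCategory_getD]
  set L := (PySem.Str.lower filename).toList with hL
  have hsw : ∀ p : String, PySem.Str.startswith (PySem.Str.lower filename) p = true ↔
      p.toList <+: L := by
    intro p
    rw [PySem.Str.startswith_eq, PySem.Chars.startswith_iff]
  have h1 := (hsw "sid ").trans (partition_prefix_iff "sid".toList (by decide) L)
  have h2 := (hsw "star ").trans (partition_prefix_iff "star".toList (by decide) L)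
  have h3 := (hsw "iac ").trans (partition_prefix_iff "iac".toList (by decide) L)
  have h4 := (hsw "vac ").trans (partition_prefix_iff "vac".toList (by decide) L)
  simp only at h1 h2 h3 h4
  simp only [h1, h2, h3, h4]
  generalize hx : List.takeWhile (fun c => c != ' ') L = x
  generalize hy : List.dropWhile (fun c => c != ' ') L = y
  clear hx hy h1 h2 h3 h4 hsw hL hdom
  clear_value L
  clear L
  have hof : ∀ (s : String) (l : List Char), (s = String.ofList l) ↔ s.toList = l := by
    intro s l; rw [String.ext_iff]; simp
  simp only [hof, show "sid".toList = ['s', 'i', 'd'] from rfl,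
    show "star".toList = ['s', 't', 'a', 'r'] from rfl,
    show "iac".toList = ['i', 'a', 'c'] from rfl,
    show "vac".toList = ['v', 'a', 'c'] from rfl]
  clear hof
  split_ifs <;> first | rfl | simp_all
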